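-- pv_equiv track=rewrite | github.com/thibserot/electronics-catalog | scripts/generate_id_registry.py | next_in_family
-- ===== SOURCE A (Python) =====
-- def next_in_family(used_nums, hund):
--     base = hund * 100
--     if base not in used_nums:
--         return f"{base:03d}"
--     for off in range(0, 100):
--         n = base + off
--         if n not in used_nums:
--             return f"{n:03d}"
--     return None
-- ===== SOURCE B (Python) =====
-- def next_in_family(used_nums, hund):
--     base = hund * 100
--     avail = set(range(base, base + 100)).difference(used_nums)
--     if not avail:
--         return None
--     return f"{min(avail):03d}"
-- ===== Notes on version B (the rewrite author's own statement) =====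
-- stated objective: simpler
-- what changed: Replaces the redundant pre-check plus offset-scanning early-return loop with construct-then-reduce: build the block's candidate set, subtract the used numbers, and take min of the remainder (empty set -> None).
import Mathlib
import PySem

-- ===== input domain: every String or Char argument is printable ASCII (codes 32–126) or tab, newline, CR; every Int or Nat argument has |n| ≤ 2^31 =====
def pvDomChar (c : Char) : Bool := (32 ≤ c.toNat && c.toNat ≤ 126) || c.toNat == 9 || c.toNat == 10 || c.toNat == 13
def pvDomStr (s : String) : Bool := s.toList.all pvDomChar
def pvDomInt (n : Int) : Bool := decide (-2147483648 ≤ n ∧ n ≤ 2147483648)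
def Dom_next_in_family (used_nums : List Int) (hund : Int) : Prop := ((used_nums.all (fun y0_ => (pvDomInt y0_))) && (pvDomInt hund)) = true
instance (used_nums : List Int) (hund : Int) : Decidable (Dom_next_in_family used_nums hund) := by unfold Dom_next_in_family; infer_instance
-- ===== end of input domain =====

-- B replaces A's offset-scanning early-return loop by construct-then-reduce (candidate set minus used, then min); objective: simpler.

-- f"{n:03d}"  ==  str(n).zfill(3)  (exact for any int; sign stays in front)
def pvFmt3 (n : Int) : String := PySem.Str.zfill (PySem.Int.toStr n) 3

-- ===== PORT A =====
-- the 'for off in range(0,100)' loop with early return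
def pvLoopA (used_nums : List Int) (base : Int) : List Int → Option String
  | [] => none
  | off :: rest =>
      let n := base + off
      if n ∈ used_nums then pvLoopA used_nums base rest else some (pvFmt3 n)

def next_in_family (used_nums : List Int) (hund : Int) : Option String :=
  let base := hund * 100
  if base ∈ used_nums then
    pvLoopA used_nums base (PySem.List.pyRange 0 100 1)
  else some (pvFmt3 base)

-- ===== PORT B =====
def next_in_family_alt (used_nums : List Int) (hund : Int) : Option String :=
  let base := hund * 100
  let avail : PySem.Set Int :=
    PySem.Set.diff (PySem.Set.ofList (PySem.List.pyRange base (base + 100) 1)) used_nums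
  match PySem.List.min? avail (fun x => x) with
  | none => none
  | some m => some (pvFmt3 m)

-- ===== PRECONDITION & SPEC =====
def Spec_next_in_family (used_nums : List Int) (hund : Int) (out : Option String) : Prop := out = next_in_family_alt used_nums hund
instance (used_nums : List Int) (hund : Int) (out : Option String) : Decidable (Spec_next_in_family used_nums hund out) := by unfold Spec_next_in_family; infer_instance

-- ===== CLAIM (what is proved, stated in full; the proofs are below) =====
def Claim_equal_next_in_family : Prop := ∀ (used_nums : List Int) (hund : Int), Dom_next_in_family used_nums hund → Spec_next_in_family used_nums hund (next_in_family used_nums hund)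

-- ===== LEMMAS AND PROOFS =====

-- A's loop is find?-then-format over the shifted range
theorem pvLoopA_eq_find (used_nums : List Int) (base : Int) (offs : List Int) :
    pvLoopA used_nums base offs
      = ((offs.map (fun o => base + o)).find? (fun n => !used_nums.contains n)).map pvFmt3 := by
  induction offs with
  | nil => rfl
  | cons o rest ih =>
      by_cases h : base + o ∈ used_nums <;>
        simp [pvLoopA, h, ih]

theorem pv_map_range (base : Int) :
    (PySem.List.pyRange 0 100 1).map (fun o => base + o)
      = PySem.List.pyRange base (base + 100) 1 := by
  rw [PySem.List.pyRange_one, PySem.List.pyRange_one]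
  simp [Function.comp_def]

-- min of a filtered sorted list is its first kept element
theorem pv_min_filter_eq_find (l : List Int) (p : Int → Bool) (h : l.Pairwise (· ≤ ·)) :
    PySem.List.min? (l.filter p) (fun x => x) = l.find? p := by
  induction l with
  | nil => rfl
  | cons a t ih =>
      rw [List.pairwise_cons] at h
      cases hpa : p a
      · have hpa' : ¬ p a = true := by simp [hpa]
        rw [List.filter_cons_of_neg hpa', List.find?_cons_of_neg hpa']
        exact ih h.2
      · rw [List.filter_cons_of_pos hpa, List.find?_cons_of_pos hpa, PySem.List.min?_id_cons]
        congr 1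
        rcases PySem.List.foldl_min_mem (t.filter p) a with heq | hmem
        · exact heq
        · have h1 := (PySem.List.foldl_min_le (t.filter p) a).1
          have h2 : a ≤ (t.filter p).foldl min a := h.1 _ (List.mem_of_mem_filter hmem)
          omega

theorem next_in_family_spec' (used_nums : List Int) (hund : Int) :
    next_in_family used_nums hund = next_in_family_alt used_nums hund := by
  unfold next_in_family next_in_family_alt
  dsimp only
  have hnodup : (PySem.List.pyRange (hund * 100) (hund * 100 + 100) 1).Nodup :=
    PySem.List.nodup_pyRange_one _ _
  have hsorted : (PySem.List.pyRange (hund * 100) (hund * 100 + 100) 1).Pairwise (· ≤ ·) :=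
    (PySem.List.pairwise_lt_pyRange_one _ _).imp (fun h => le_of_lt h)
  rw [show (PySem.Set.ofList (PySem.List.pyRange (hund * 100) (hund * 100 + 100) 1)) = PySem.List.pyRange (hund * 100) (hund * 100 + 100) 1 from PySem.Set.ofList_eq_self_of_nodup _ hnodup]
  simp only [PySem.Set.diff, PySem.Set.contains_eq_listContains]
  rw [pv_min_filter_eq_find _ _ hsorted]
  have hcons : PySem.List.pyRange (hund * 100) (hund * 100 + 100) 1
      = hund * 100 :: PySem.List.pyRange (hund * 100 + 1) (hund * 100 + 100) 1 :=
    PySem.List.pyRange_one_cons (by omega)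
  by_cases hb : hund * 100 ∈ used_nums
  · rw [if_pos hb, pvLoopA_eq_find, pv_map_range]
    cases (PySem.List.pyRange (hund * 100) (hund * 100 + 100) 1).find?
        (fun n => !used_nums.contains n) <;> rfl
  · rw [if_neg hb, hcons, List.find?_cons]
    simp [hb]

-- ===== VERDICT (by name: the statement is the Claim_ definition above) =====
theorem next_in_family_spec : Claim_equal_next_in_family := by
  intro used_nums hund _
  exact next_in_family_spec' used_nums hund
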